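-- pv_equiv track=rewrite | github.com/RickAvv/Shut-the-box | Prob_best_strategy.py | choose_and_flip
-- ===== SOURCE A (Python) =====
-- import itertools
--
-- def flip_tiles(tiles, comb_choice):
--     tiles_after = [a for a in tiles]
--     for digit in comb_choice:
--         tiles_after.remove(digit)
--     return tiles_after
--
-- def greater_than(a,b):
--     if a == []:
--         return False
--     else:
--         if b == []:
--             return True
--     a1 = [i for i in a]
--     b1 = [i for i in b]
--     ma = max(a1)
--     mb = max(b1)
--     if ma > mb:
--         return True
--     if ma == mb:
--         a1.remove(ma)
--         b1.remove(mb)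
--         return greater_than(a1,b1)
--     else:
--         return False
--
-- def choose_and_flip(tiles, dice_result):
--     last_min = 0
--     last_max = 0
--     last_len = 9
--     comb_choice = []
--     combinations = [seq for i in range(len(tiles), 0, -1) for seq in itertools.combinations(tiles, i) if sum(seq) == dice_result]
--     if combinations == []:
--         return [tiles,[]]
--     for comb in combinations:
-- #choose combination with highest digit
--         if greater_than(comb,comb_choice):
--             comb_choice = comb
--
-- #choose combination whose lowest digit is higher than all the others' lowest digit
-- #        if min(comb) >= last_min:
-- #            last_min = min(comb)
-- #            comb_choice = comb
--
-- #choose combination that minimizes the number of tiles flipped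
-- #and choose the one with higher numbers
-- #        if len(comb) < last_len:
-- #            last_len = len(comb)
-- #            comb_choice = comb
--
--     tiles_after = flip_tiles(tiles,comb_choice)
--     return [tiles_after, comb_choice]
-- ===== SOURCE B (Python) =====
-- def choose_and_flip(tiles, dice_result):
--     def insert_desc(x, key):
--         # insert x into a descending-sorted list
--         if not key or x >= key[0]:
--             return [x] + key
--         return [key[0]] + insert_desc(x, key[1:])
--
--     def gt_key(a, b):
--         # strict lexicographic comparison of descending keys; a longer key
--         # beats its own proper prefix
--         for x, y in zip(a, b):
--             if x != y:
--                 return x > y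
--         return len(a) > len(b)
--
--     def best(items, target):
--         # greatest-key subset of items summing to target, as
--         # (choice in original order, untouched rest, descending key); None if impossible
--         if not items:
--             return ([], [], []) if target == 0 else None
--         x, rest = items[0], items[1:]
--         take = best(rest, target - x)
--         skip = best(rest, target)
--         if take is not None:
--             take = ([x] + take[0], take[1], insert_desc(x, take[2]))
--         if skip is not None:
--             skip = (skip[0], [x] + skip[1], skip[2])
--         if take is None:
--             return skip
--         if skip is None:
--             return take
--         return skip if gt_key(skip[2], take[2]) else take
--
--     res = best(tiles, dice_result)
--     if res is None or res[0] == []: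
--         return [tiles, []]
--     return [res[1], tuple(res[0])]
-- ===== Notes on version B (the rewrite author's own statement) =====
-- stated objective: alternative
-- what changed: A enumerates every combination of every size and keeps the best under a recursive max-removal comparison; B runs one take/skip recursion over the tiles that carries (choice, rest, descending key) triples, merging the two branches with a lexicographic key comparison, so no combination list is ever materialised.
import Mathlib
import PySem

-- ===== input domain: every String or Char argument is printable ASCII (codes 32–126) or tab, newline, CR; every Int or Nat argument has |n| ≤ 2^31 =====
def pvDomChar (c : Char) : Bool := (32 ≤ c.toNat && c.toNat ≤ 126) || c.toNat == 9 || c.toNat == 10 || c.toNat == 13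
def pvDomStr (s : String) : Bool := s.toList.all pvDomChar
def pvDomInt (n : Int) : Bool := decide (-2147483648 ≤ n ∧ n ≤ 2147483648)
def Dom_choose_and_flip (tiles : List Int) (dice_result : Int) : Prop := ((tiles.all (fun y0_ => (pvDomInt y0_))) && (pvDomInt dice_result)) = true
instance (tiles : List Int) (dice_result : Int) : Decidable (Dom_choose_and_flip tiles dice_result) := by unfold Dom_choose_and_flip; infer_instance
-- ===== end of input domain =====

-- B replaces A's enumerate-all-combinations-then-compare search by a single take/skip
-- recursion over the tiles carrying (choice, rest, descending key) triples ("alternative").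

-- ===== PORT A =====

-- hand port of itertools.combinations(l, k): lexicographic by positions, exact
def pyCombinations (l : List Int) (k : Nat) : List (List Int) :=
  match k, l with
  | 0, _ => [[]]
  | _ + 1, [] => []
  | k + 1, x :: xs => (pyCombinations xs k).map (fun c => x :: c) ++ pyCombinations xs (k + 1)

def flip_tiles (tiles comb_choice : List Int) : List Int :=
  comb_choice.foldl (fun acc digit => (PySem.List.remove? acc digit).getD []) tiles

def greater_than (a b : List Int) : Bool :=
  if a = [] then false
  else if b = [] then true
  else
    -- max(a1) always succeeds here (a ≠ []), so the port reads it with getD 0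
    let ma := (PySem.List.max? a (fun y => y)).getD 0
    let mb := (PySem.List.max? b (fun y => y)).getD 0
    if ma > mb then true
    else if ma = mb then
      greater_than ((PySem.List.remove? a ma).getD []) ((PySem.List.remove? b mb).getD [])
    else false
termination_by a.length
decreasing_by
  cases hmx : PySem.List.max? a (fun y => y) with
  | none =>
    rw [PySem.List.max?_eq_none_iff] at hmx
    subst hmx
    simp_all
  | some m =>
    have hm : m ∈ a := PySem.List.max?_mem hmx
    simp only [hmx, Option.getD_some]
    rw [PySem.List.remove?_eq_some_erase a m hm]
    have he := List.length_erase_of_mem hm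
    have hpos : 0 < a.length := List.length_pos_of_mem hm
    simp only [Option.getD_some]
    omega

def choose_and_flip (tiles : List Int) (dice_result : Int) : List (List Int) :=
  -- last_min / last_max / last_len are dead variables in A; comb_choice starts as []
  let combinations :=
    (PySem.List.pyRange (tiles.length : Int) 0 (-1)).flatMap
      (fun i => (pyCombinations tiles i.toNat).filter (fun seq => seq.sum == dice_result))
  if combinations = [] then [tiles, []]
  else
    let comb_choice :=
      combinations.foldl (fun comb_choice comb =>
        if greater_than comb comb_choice then comb else comb_choice) []
    [flip_tiles tiles comb_choice, comb_choice]

-- ===== PORT B =====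

def insertDesc (x : Int) (key : List Int) : List Int :=
  match key with
  | [] => [x]
  | y :: ys => if x ≥ y then x :: y :: ys else y :: insertDesc x ys

def gtKey (a b : List Int) : Bool :=
  match a, b with
  | [], [] => false
  | [], _ :: _ => false
  | _ :: _, [] => true
  | x :: xs, y :: ys => if x = y then gtKey xs ys else decide (x > y)

def bestTriple (items : List Int) (target : Int) : Option (List Int × List Int × List Int) :=
  match items with
  | [] => if target = 0 then some ([], [], []) else none
  | x :: rest =>
    let take := (bestTriple rest (target - x)).map (fun r => (x :: r.1, r.2.1, insertDesc x r.2.2))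
    let skip := (bestTriple rest target).map (fun r => (r.1, x :: r.2.1, r.2.2))
    match take, skip with
    | none, s => s
    | some t, none => some t
    | some t, some s => if gtKey s.2.2 t.2.2 then some s else some t

def choose_and_flip_alt (tiles : List Int) (dice_result : Int) : List (List Int) :=
  match bestTriple tiles dice_result with
  | none => [tiles, []]
  | some (c, a, _) => if c = [] then [tiles, []] else [a, c]

-- ===== PRECONDITION & SPEC =====
def Spec_choose_and_flip (tiles : List Int) (dice_result : Int) (out : List (List Int)) : Prop := out = choose_and_flip_alt tiles dice_result
instance (tiles : List Int) (dice_result : Int) (out : List (List Int)) : Decidable (Spec_choose_and_flip tiles dice_result out) := by unfold Spec_choose_and_flip; infer_instance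

-- ===== CLAIM (what is proved, stated in full; the proofs are below) =====
def Claim_equal_choose_and_flip : Prop := ∀ (tiles : List Int) (dice_result : Int), Dom_choose_and_flip tiles dice_result → Spec_choose_and_flip tiles dice_result (choose_and_flip tiles dice_result)

-- ===== LEMMAS AND PROOFS =====

-- descending order on keys
def DescSorted (l : List Int) : Prop := l.Pairwise (fun p q => q ≤ p)

-- insertion sort by insertDesc: the descending key of a list
def keyOf (l : List Int) : List Int := l.foldr insertDesc []

def scanChoice : List Int → List Int → List Int
  | [], _ => []
  | x :: xs, M => if x ∈ M then x :: scanChoice xs (M.erase x) else scanChoice xs M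

def scanAfter : List Int → List Int → List Int
  | [], _ => []
  | x :: xs, M => if x ∈ M then scanAfter xs (M.erase x) else x :: scanAfter xs M

def combsA (tiles : List Int) (t : Int) : List (List Int) :=
  (PySem.List.pyRange (tiles.length : Int) 0 (-1)).flatMap
    (fun i => (pyCombinations tiles i.toNat).filter (fun seq => seq.sum == t))

theorem choose_and_flip_eq (tiles : List Int) (t : Int) :
    choose_and_flip tiles t =
      if combsA tiles t = [] then [tiles, []]
      else
        [flip_tiles tiles ((combsA tiles t).foldl
            (fun cc comb => if greater_than comb cc then comb else cc) []),
          (combsA tiles t).foldl (fun cc comb => if greater_than comb cc then comb else cc) []] := by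
  rfl

-- ===== basic gtKey facts =====

theorem gtKey_nil_left (b : List Int) : gtKey [] b = false := by
  cases b <;> rfl

theorem gtKey_nil_right (a : List Int) (ha : a ≠ []) : gtKey a [] = true := by
  cases a with
  | nil => exact absurd rfl ha
  | cons x xs => rfl

theorem gtKey_cons_same (x : Int) (a b : List Int) : gtKey (x :: a) (x :: b) = gtKey a b := by
  simp [gtKey]

theorem gtKey_trichotomy : ∀ a b : List Int, gtKey a b = false → gtKey b a = false → a = b := by
  intro a
  induction a with
  | nil =>
    intro b h1 h2
    cases b with
    | nil => rfl
    | cons y ys => simp [gtKey] at h2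
  | cons x xs ih =>
    intro b h1 h2
    cases b with
    | nil => simp [gtKey] at h1
    | cons y ys =>
      simp only [gtKey] at h1 h2
      by_cases hxy : x = y
      · subst hxy
        simp only [if_pos rfl] at h1 h2
        rw [ih ys h1 h2]
      · rw [if_neg hxy, decide_eq_false_iff_not] at h1
        rw [if_neg (Ne.symm hxy), decide_eq_false_iff_not] at h2
        exfalso; omega

theorem gtKey_trans : ∀ a b c : List Int, gtKey a b = true → gtKey b c = true → gtKey a c = true := by
  intro a
  induction a with
  | nil => intro b c h1 _; rw [gtKey_nil_left] at h1; cases h1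
  | cons x xs ih =>
    intro b c h1 h2
    cases b with
    | nil => rw [gtKey_nil_left] at h2; cases h2
    | cons y ys =>
      cases c with
      | nil => rfl
      | cons z zs =>
        simp only [gtKey] at h1 h2 ⊢
        split_ifs at h1 h2 ⊢ with hxy hyz hxz <;>
          first
          | exact ih _ _ h1 h2
          | (simp only [decide_eq_true_eq] at h1 h2 ⊢ <;> omega)

theorem ge_trans_key (a b c : List Int) (h1 : gtKey a b = false) (h2 : gtKey b c = false) :
    gtKey a c = false := by
  cases hac : gtKey a c with
  | false => rfl
  | true =>
    cases hba : gtKey b a with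
    | false =>
      have hab := gtKey_trichotomy a b h1 hba
      subst hab
      rw [h2] at hac; exact hac.symm
    | true =>
      have := gtKey_trans b a c hba hac
      rw [this] at h2; exact h2

theorem insertDesc_ge_mono : ∀ (b a : List Int) (x : Int), gtKey b a = false →
    gtKey (insertDesc x b) (insertDesc x a) = false := by
  intro b
  induction b with
  | nil =>
    intro a x _
    cases a with
    | nil => simp [insertDesc, gtKey]
    | cons u as =>
      simp only [insertDesc]
      by_cases hxu : x ≥ u
      · rw [if_pos hxu]
        simp [gtKey, gtKey_nil_left]
      · rw [if_neg hxu]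
        simp only [gtKey]
        rw [if_neg (by omega : ¬ x = u), decide_eq_false_iff_not]
        omega
  | cons v bs ih =>
    intro a x hvb
    cases a with
    | nil => simp [gtKey] at hvb
    | cons u as =>
      simp only [insertDesc]
      by_cases hxv : x ≥ v <;> by_cases hxu : x ≥ u
      · rw [if_pos hxv, if_pos hxu, gtKey_cons_same]
        exact hvb
      · rw [if_pos hxv, if_neg hxu]
        simp only [gtKey]
        rw [if_neg (by omega : ¬ x = u), decide_eq_false_iff_not]
        omega
      · -- x < v, x ≥ u : contradiction with gtKey (v::bs) (u::as) = false
        exfalso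
        simp only [gtKey] at hvb
        by_cases hvu : v = u
        · omega
        · rw [if_neg hvu, decide_eq_false_iff_not] at hvb; omega
      · rw [if_neg hxv, if_neg hxu]
        simp only [gtKey] at hvb ⊢
        by_cases hvu : v = u
        · rw [if_pos hvu] at hvb ⊢
          exact ih as x hvb
        · rw [if_neg hvu] at hvb ⊢
          exact hvb

-- ===== keyOf facts =====

theorem insertDesc_perm (x : Int) (l : List Int) : (insertDesc x l).Perm (x :: l) := by
  induction l with
  | nil => exact List.Perm.refl _
  | cons y ys ih =>
    simp only [insertDesc]
    split
    · exact List.Perm.refl _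
    · exact (ih.cons y).trans (List.Perm.swap x y ys)

theorem insertDesc_sorted (x : Int) (l : List Int) (h : DescSorted l) :
    DescSorted (insertDesc x l) := by
  induction l with
  | nil => simp [insertDesc, DescSorted]
  | cons y ys ih =>
    unfold DescSorted at h ⊢
    rw [List.pairwise_cons] at h
    obtain ⟨hy, hys⟩ := h
    simp only [insertDesc]
    split
    · rw [List.pairwise_cons]
      refine ⟨?_, List.pairwise_cons.mpr ⟨hy, hys⟩⟩
      intro z hz
      rcases List.mem_cons.mp hz with rfl | hz
      · omega
      · exact le_trans (hy z hz) (by omega)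
    · rw [List.pairwise_cons]
      refine ⟨?_, ih hys⟩
      intro z hz
      have : z ∈ x :: ys := (insertDesc_perm x ys).subset hz
      rcases List.mem_cons.mp this with rfl | hz'
      · omega
      · exact hy z hz'

theorem keyOf_perm (l : List Int) : (keyOf l).Perm l := by
  induction l with
  | nil => exact List.Perm.refl _
  | cons x xs ih =>
    exact (insertDesc_perm x (keyOf xs)).trans (ih.cons x)

theorem keyOf_sorted (l : List Int) : DescSorted (keyOf l) := by
  induction l with
  | nil => simp [keyOf, DescSorted]
  | cons x xs ih => exact insertDesc_sorted x (keyOf xs) ih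

theorem sortedDesc_unique : ∀ l1 l2 : List Int, l1.Perm l2 → DescSorted l1 → DescSorted l2 →
    l1 = l2 := by
  intro l1
  induction l1 with
  | nil =>
    intro l2 hp _ _
    exact (hp.symm.eq_nil).symm ▸ rfl
  | cons x xs ih =>
    intro l2 hp h1 h2
    cases l2 with
    | nil => exact absurd hp.eq_nil (by simp)
    | cons y ys =>
      unfold DescSorted at h1 h2
      rw [List.pairwise_cons] at h1 h2
      have hxy : x = y := by
        have hx2 : x ∈ y :: ys := hp.subset (List.mem_cons_self ..)
        have hy1 : y ∈ x :: xs := hp.symm.subset (List.mem_cons_self ..)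
        rcases List.mem_cons.mp hx2 with h | h
        · exact h
        · have hx_le : x ≤ y := h2.1 x h
          rcases List.mem_cons.mp hy1 with h' | h'
          · exact h'.symm
          · have hy_le : y ≤ x := h1.1 y h'
            omega
      subst hxy
      rw [ih ys hp.cons_inv h1.2 h2.2]

theorem keyOf_eq_of_perm (l l' : List Int) (h : l.Perm l') : keyOf l = keyOf l' := by
  exact sortedDesc_unique _ _ ((keyOf_perm l).trans (h.trans (keyOf_perm l').symm))
    (keyOf_sorted l) (keyOf_sorted l')

theorem keyOf_sorted_self (l : List Int) (h : DescSorted l) : keyOf l = l := by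
  exact sortedDesc_unique _ _ (keyOf_perm l) (keyOf_sorted l) h

theorem keyOf_cons (x : Int) (l : List Int) : keyOf (x :: l) = insertDesc x (keyOf l) := rfl

theorem sorted_erase (x : Int) (M : List Int) (h : DescSorted M) : DescSorted (M.erase x) := by
  exact List.Pairwise.sublist (List.erase_sublist) h

theorem erase_insertDesc (x : Int) (k : List Int) (h : DescSorted k) :
    (insertDesc x k).erase x = k := by
  apply sortedDesc_unique
  · have := List.Perm.erase x (insertDesc_perm x k)
    rwa [List.erase_cons_head] at this
  · exact sorted_erase x _ (insertDesc_sorted x k h)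
  · exact h

theorem insertDesc_erase (x : Int) (M : List Int) (hM : DescSorted M) (hx : x ∈ M) :
    insertDesc x (M.erase x) = M := by
  apply sortedDesc_unique
  · exact (insertDesc_perm x (M.erase x)).trans (List.perm_cons_erase hx).symm
  · exact insertDesc_sorted x _ (sorted_erase x M hM)
  · exact hM

theorem mem_insertDesc_self (x : Int) (k : List Int) : x ∈ insertDesc x k :=
  (insertDesc_perm x k).symm.subset (List.mem_cons_self ..)

theorem sum_keyOf (l : List Int) : (keyOf l).sum = l.sum :=
  (keyOf_perm l).sum_eq

theorem length_keyOf (l : List Int) : (keyOf l).length = l.length :=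
  (keyOf_perm l).length_eq

theorem keyOf_eq_nil_iff (l : List Int) : keyOf l = [] ↔ l = [] := by
  constructor
  · intro h
    have := keyOf_perm l
    rw [h] at this
    exact this.symm.eq_nil
  · intro h; subst h; rfl

-- ===== greater_than = gtKey on keys =====

theorem keyOf_head (a : List Int) (ha : a ≠ []) :
    ∃ m r, PySem.List.max? a (fun y => y) = some m ∧ keyOf a = m :: r ∧
      keyOf ((PySem.List.remove? a m).getD []) = r ∧ m ∈ a := by
  obtain ⟨m, r, hk⟩ : ∃ m r, keyOf a = m :: r := by
    cases hk : keyOf a with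
    | nil => exact absurd ((keyOf_eq_nil_iff a).mp hk) ha
    | cons m r => exact ⟨m, r, rfl⟩
  have hsorted := keyOf_sorted a
  rw [hk] at hsorted
  unfold DescSorted at hsorted
  rw [List.pairwise_cons] at hsorted
  have hmax : ∀ y ∈ a, y ≤ m := by
    intro y hy
    have : y ∈ m :: r := by
      rw [← hk]
      exact (keyOf_perm a).symm.subset hy
    rcases List.mem_cons.mp this with rfl | h
    · exact le_refl _
    · exact hsorted.1 y h
  have hm_mem : m ∈ a := by
    apply (keyOf_perm a).subset
    rw [hk]
    exact List.mem_cons_self ..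
  refine ⟨m, r, ?_, hk, ?_, hm_mem⟩
  · cases hmx : PySem.List.max? a (fun y => y) with
    | none =>
      rw [PySem.List.max?_eq_none_iff] at hmx
      exact absurd hmx ha
    | some m' =>
      have h1 : m' ∈ a := PySem.List.max?_mem hmx
      have h2 := PySem.List.max?_isMax hmx
      have hle1 : m ≤ m' := h2 m hm_mem
      have hle2 : m' ≤ m := hmax m' h1
      rw [le_antisymm hle2 hle1]
  · rw [PySem.List.remove?_eq_some_erase a m hm_mem, Option.getD_some]
    have hperm : (a.erase m).Perm r := by
      have := List.Perm.erase m (keyOf_perm a).symm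
      rw [hk, List.erase_cons_head] at this
      exact this
    rw [keyOf_eq_of_perm _ _ hperm]
    exact keyOf_sorted_self r hsorted.2

theorem greater_than_eq_aux : ∀ (n : Nat) (a b : List Int), a.length ≤ n →
    greater_than a b = gtKey (keyOf a) (keyOf b) := by
  intro n
  induction n with
  | zero =>
    intro a b hlen
    have ha : a = [] := by
      cases a with
      | nil => rfl
      | cons _ _ => simp at hlen
    subst ha
    rw [greater_than]
    simp [keyOf, gtKey_nil_left]
  | succ n ih =>
    intro a b hlen
    by_cases ha : a = []
    · subst ha
      rw [greater_than]
      simp [keyOf, gtKey_nil_left]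
    · by_cases hb : b = []
      · subst hb
        have h1 : greater_than a [] = true := by
          rw [greater_than]; simp [ha]
        rw [h1, show keyOf ([] : List Int) = [] from rfl,
          gtKey_nil_right _ (fun h => ha ((keyOf_eq_nil_iff a).mp h))]
      · obtain ⟨ma, ra, hmxa, hka, hra, hmema⟩ := keyOf_head a ha
        obtain ⟨mb, rb, hmxb, hkb, hrb, hmemb⟩ := keyOf_head b hb
        rw [greater_than]
        simp only [if_neg ha, if_neg hb, hmxa, hmxb, Option.getD_some]
        rw [hka, hkb]
        simp only [gtKey]
        by_cases h1 : ma > mb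
        · rw [if_pos h1, if_neg (by omega : ¬ ma = mb)]
          exact (decide_eq_true h1).symm
        · rw [if_neg h1]
          by_cases h2 : ma = mb
          · rw [if_pos h2, if_pos h2]
            have hlen' : ((PySem.List.remove? a ma).getD []).length ≤ n := by
              rw [PySem.List.remove?_eq_some_erase a ma hmema, Option.getD_some]
              have he := List.length_erase_of_mem hmema
              have hpos : 0 < a.length := List.length_pos_of_ne_nil ha
              omega
            rw [ih _ _ hlen', hra, hrb]
          · rw [if_neg h2, if_neg h2]
            exact (decide_eq_false h1).symm

theorem greater_than_eq (a b : List Int) : greater_than a b = gtKey (keyOf a) (keyOf b) :=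
  greater_than_eq_aux a.length a b (le_refl _)

-- ===== B-side invariant =====

theorem bestTriple_spec : ∀ (l : List Int) (t : Int),
    (bestTriple l t = none → ∀ d : List Int, d.Sublist l → d.sum = t → False) ∧
    (∀ c a k, bestTriple l t = some (c, a, k) →
      c.Sublist l ∧ c.sum = t ∧ k = keyOf c ∧ c = scanChoice l k ∧ a = scanAfter l k ∧
      (∀ d : List Int, d.Sublist l → d.sum = t → gtKey (keyOf d) k = false)) := by
  intro l
  induction l with
  | nil =>
    intro t
    constructor
    · intro hnone d hd hsum
      rw [List.sublist_nil] at hd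
      subst hd
      rw [List.sum_nil] at hsum
      rw [bestTriple, if_pos hsum.symm] at hnone
      cases hnone
    · intro c a k hsome
      by_cases ht : t = 0
      · rw [bestTriple, if_pos ht] at hsome
        subst ht
        rw [Option.some.injEq, Prod.mk.injEq, Prod.mk.injEq] at hsome
        obtain ⟨rfl, rfl, rfl⟩ := hsome
        refine ⟨List.Sublist.refl _, rfl, rfl, rfl, rfl, ?_⟩
        intro d hd _
        rw [List.sublist_nil] at hd
        subst hd
        rfl
      · rw [bestTriple, if_neg ht] at hsome
        cases hsome
  | cons x xs ih =>
    intro t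
    obtain ⟨N1, S1⟩ := ih (t - x)
    obtain ⟨N2, S2⟩ := ih t
    cases ho1 : bestTriple xs (t - x) with
    | none =>
      cases ho2 : bestTriple xs t with
      | none =>
        have hres : bestTriple (x :: xs) t = none := by
          simp [bestTriple, ho1, ho2]
        refine ⟨?_, ?_⟩
        · intro _ d hd hsum
          rcases List.sublist_cons_iff.mp hd with hd' | ⟨r, rfl, hr⟩
          · exact N2 ho2 d hd' hsum
          · refine N1 ho1 r hr ?_
            rw [List.sum_cons] at hsum; omega
        · intro c a k hsome
          rw [hres] at hsome; cases hsome
      | some s =>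
        obtain ⟨c2, a2, k2⟩ := s
        obtain ⟨hsub2, hsum2, hk2, hsc2, hsa2, hmax2⟩ := S2 c2 a2 k2 ho2
        have hres : bestTriple (x :: xs) t = some (c2, x :: a2, k2) := by
          simp [bestTriple, ho1, ho2]
        have hxk2 : x ∉ k2 := by
          intro hx
          have hxc2 : x ∈ c2 := (keyOf_perm c2).subset (hk2 ▸ hx)
          have hdsub : (c2.erase x).Sublist xs := List.Sublist.trans List.erase_sublist hsub2
          have hdsum : (c2.erase x).sum = t - x := by
            have := List.sum_erase hxc2
            omega
          exact N1 ho1 _ hdsub hdsum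
        refine ⟨?_, ?_⟩
        · intro h; rw [hres] at h; cases h
        · intro c a k hsome
          rw [hres, Option.some.injEq, Prod.mk.injEq, Prod.mk.injEq] at hsome
          obtain ⟨rfl, rfl, rfl⟩ := hsome
          refine ⟨hsub2.cons x, hsum2, hk2, ?_, ?_, ?_⟩
          · simp only [scanChoice, if_neg hxk2]
            exact hsc2
          · simp only [scanAfter, if_neg hxk2]
            rw [← hsa2]
          · intro d hd hsum
            rcases List.sublist_cons_iff.mp hd with hd' | ⟨r, rfl, hr⟩
            · exact hmax2 d hd' hsum
            · exact (N1 ho1 r hr (by rw [List.sum_cons] at hsum; omega)).elim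
    | some r1 =>
      obtain ⟨c1, a1, k1⟩ := r1
      obtain ⟨hsub1, hsum1, hk1, hsc1, hsa1, hmax1⟩ := S1 c1 a1 k1 ho1
      have hk1sorted : DescSorted k1 := hk1 ▸ keyOf_sorted c1
      have take_sound : (x :: c1).Sublist (x :: xs) ∧ (x :: c1).sum = t ∧
          insertDesc x k1 = keyOf (x :: c1) ∧ x :: c1 = scanChoice (x :: xs) (insertDesc x k1) ∧
          a1 = scanAfter (x :: xs) (insertDesc x k1) := by
        refine ⟨List.Sublist.cons₂ x hsub1, ?_, ?_, ?_, ?_⟩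
        · rw [List.sum_cons]; omega
        · rw [keyOf_cons, ← hk1]
        · have hxmem := mem_insertDesc_self x k1
          simp only [scanChoice, if_pos hxmem]
          rw [erase_insertDesc x k1 hk1sorted, ← hsc1]
        · have hxmem := mem_insertDesc_self x k1
          simp only [scanAfter, if_pos hxmem]
          rw [erase_insertDesc x k1 hk1sorted, ← hsa1]
      have take_max_cons : ∀ r : List Int, r.Sublist xs → (x :: r).sum = t →
          gtKey (keyOf (x :: r)) (insertDesc x k1) = false := by
        intro r hr hsum
        rw [keyOf_cons]
        apply insertDesc_ge_mono
        apply hmax1 r hr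
        rw [List.sum_cons] at hsum; omega
      cases ho2 : bestTriple xs t with
      | none =>
        have hres : bestTriple (x :: xs) t = some (x :: c1, a1, insertDesc x k1) := by
          simp [bestTriple, ho1, ho2]
        refine ⟨?_, ?_⟩
        · intro h; rw [hres] at h; cases h
        · intro c a k hsome
          rw [hres, Option.some.injEq, Prod.mk.injEq, Prod.mk.injEq] at hsome
          obtain ⟨rfl, rfl, rfl⟩ := hsome
          obtain ⟨q1, q2, q3, q4, q5⟩ := take_sound
          refine ⟨q1, q2, q3, q4, q5, ?_⟩
          intro d hd hsum
          rcases List.sublist_cons_iff.mp hd with hd' | ⟨r, rfl, hr⟩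
          · exact (N2 ho2 d hd' hsum).elim
          · exact take_max_cons r hr hsum
      | some r2 =>
        obtain ⟨c2, a2, k2⟩ := r2
        obtain ⟨hsub2, hsum2, hk2, hsc2, hsa2, hmax2⟩ := S2 c2 a2 k2 ho2
        by_cases hgt : gtKey k2 (insertDesc x k1) = true
        · -- skip branch wins strictly
          have hres : bestTriple (x :: xs) t = some (c2, x :: a2, k2) := by
            simp [bestTriple, ho1, ho2, hgt]
          have hk2sorted : DescSorted k2 := hk2 ▸ keyOf_sorted c2
          have hxk2 : x ∉ k2 := by
            intro hx
            have hxc2 : x ∈ c2 := (keyOf_perm c2).subset (hk2 ▸ hx)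
            have hdsub : (c2.erase x).Sublist xs := List.Sublist.trans List.erase_sublist hsub2
            have hdsum : (c2.erase x).sum = t - x := by
              have := List.sum_erase hxc2
              omega
            have hkey_d : keyOf (c2.erase x) = k2.erase x := by
              have hperm : (c2.erase x).Perm (k2.erase x) := by
                have h' := List.Perm.erase x (keyOf_perm c2).symm
                rw [← hk2] at h'
                exact h' 
              rw [keyOf_eq_of_perm _ _ hperm]
              exact keyOf_sorted_self _ (sorted_erase x k2 hk2sorted)
            have hge := hmax1 _ hdsub hdsum
            rw [hkey_d] at hge
            have hmono := insertDesc_ge_mono _ _ x hge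
            rw [insertDesc_erase x k2 hk2sorted hx] at hmono
            rw [hmono] at hgt
            cases hgt
          refine ⟨?_, ?_⟩
          · intro h; rw [hres] at h; cases h
          · intro c a k hsome
            rw [hres, Option.some.injEq, Prod.mk.injEq, Prod.mk.injEq] at hsome
            obtain ⟨rfl, rfl, rfl⟩ := hsome
            refine ⟨hsub2.cons x, hsum2, hk2, ?_, ?_, ?_⟩
            · simp only [scanChoice, if_neg hxk2]
              exact hsc2
            · simp only [scanAfter, if_neg hxk2]
              rw [← hsa2]
            · intro d hd hsum
              rcases List.sublist_cons_iff.mp hd with hd' | ⟨r, rfl, hr⟩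
              · exact hmax2 d hd' hsum
              · have h1 := take_max_cons r hr hsum
                cases hq : gtKey (keyOf (x :: r)) k2 with
                | false => rfl
                | true =>
                  have h2 := gtKey_trans _ _ _ hq hgt
                  rw [h2] at h1
                  exact h1
        · -- take branch wins (ties go to take)
          have hgt' : gtKey k2 (insertDesc x k1) = false := by
            cases h : gtKey k2 (insertDesc x k1)
            · rfl
            · exact absurd h hgt
          have hres : bestTriple (x :: xs) t = some (x :: c1, a1, insertDesc x k1) := by
            simp [bestTriple, ho1, ho2, hgt']
          refine ⟨?_, ?_⟩
          · intro h; rw [hres] at h; cases h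
          · intro c a k hsome
            rw [hres, Option.some.injEq, Prod.mk.injEq, Prod.mk.injEq] at hsome
            obtain ⟨rfl, rfl, rfl⟩ := hsome
            obtain ⟨q1, q2, q3, q4, q5⟩ := take_sound
            refine ⟨q1, q2, q3, q4, q5, ?_⟩
            intro d hd hsum
            rcases List.sublist_cons_iff.mp hd with hd' | ⟨r, rfl, hr⟩
            · exact ge_trans_key _ _ _ (hmax2 d hd' hsum) hgt'
            · exact take_max_cons r hr hsum

-- ===== A-side: membership of the combination list =====

theorem mem_pyCombinations : ∀ (l : List Int) (k : Nat) (c : List Int),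
    c ∈ pyCombinations l k ↔ c.Sublist l ∧ c.length = k := by
  intro l
  induction l with
  | nil =>
    intro k c
    cases k with
    | zero =>
      simp only [pyCombinations, List.mem_singleton]
      constructor
      · rintro rfl; exact ⟨List.Sublist.refl _, rfl⟩
      · rintro ⟨_, hl⟩; exact List.length_eq_zero_iff.mp hl
    | succ k =>
      simp only [pyCombinations, List.not_mem_nil, false_iff, not_and]
      intro hs
      rw [List.sublist_nil] at hs
      subst hs
      simp
  | cons x xs ih =>
    intro k c
    cases k with
    | zero =>
      simp only [pyCombinations, List.mem_singleton]
      constructor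
      · rintro rfl; exact ⟨List.nil_sublist _, rfl⟩
      · rintro ⟨_, hl⟩; exact List.length_eq_zero_iff.mp hl
    | succ k =>
      simp only [pyCombinations, List.mem_append, List.mem_map]
      constructor
      · rintro (⟨c', hc', rfl⟩ | hc)
        · obtain ⟨hs, hl⟩ := (ih k c').mp hc'
          exact ⟨List.Sublist.cons₂ x hs, by simp [hl]⟩
        · obtain ⟨hs, hl⟩ := (ih (k + 1) c).mp hc
          exact ⟨hs.cons x, hl⟩
      · rintro ⟨hs, hl⟩
        rcases List.sublist_cons_iff.mp hs with hs' | ⟨r, rfl, hr⟩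
        · right; exact (ih (k + 1) c).mpr ⟨hs', hl⟩
        · left
          refine ⟨r, (ih k r).mpr ⟨hr, ?_⟩, rfl⟩
          simpa using hl

theorem mem_combsA (tiles : List Int) (t : Int) (c : List Int) :
    c ∈ combsA tiles t ↔ c.Sublist tiles ∧ c ≠ [] ∧ c.sum = t := by
  unfold combsA
  rw [List.mem_flatMap]
  constructor
  · rintro ⟨i, hi, hc⟩
    rw [PySem.List.mem_pyRange_neg_one] at hi
    rw [List.mem_filter] at hc
    obtain ⟨hs, hl⟩ := (mem_pyCombinations tiles _ c).mp hc.1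
    refine ⟨hs, ?_, by simpa using hc.2⟩
    intro hnil
    subst hnil
    simp at hl
    omega
  · rintro ⟨hs, hne, hsum⟩
    refine ⟨(c.length : Int), ?_, ?_⟩
    · rw [PySem.List.mem_pyRange_neg_one]
      have h1 : 0 < c.length := List.length_pos_of_ne_nil hne
      have h2 : c.length ≤ tiles.length := hs.length_le
      omega
    · rw [List.mem_filter]
      refine ⟨(mem_pyCombinations tiles _ c).mpr ⟨hs, by simp⟩, by simpa using hsum⟩

-- ===== A-side: first combination realising the maximal key =====

theorem scanChoice_nil_key (l : List Int) : scanChoice l [] = [] := by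
  induction l with
  | nil => rfl
  | cons x xs ih => simp [scanChoice, ih]

theorem find?_filter_imp (p q : List Int → Bool) (himp : ∀ c, p c = true → q c = true) :
    ∀ X : List (List Int), (X.filter q).find? p = X.find? p := by
  intro X
  induction X with
  | nil => rfl
  | cons c X ih =>
    by_cases hq : q c = true
    · rw [List.filter_cons_of_pos hq]
      cases hp : p c
      · rw [List.find?_cons_of_neg (by simp [hp]), List.find?_cons_of_neg (by simp [hp]), ih]
      · rw [List.find?_cons_of_pos hp, List.find?_cons_of_pos hp]
    · have hp : p c = false := by
        cases hp : p c
        · rfl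
        · exact absurd (himp c hp) hq
      rw [List.filter_cons_of_neg (by simp [hq]), ih, List.find?_cons_of_neg (by simp [hp])]

theorem find?_pyCombinations : ∀ (l M : List Int), DescSorted M →
    (∃ c0, c0.Sublist l ∧ keyOf c0 = M) →
    (pyCombinations l M.length).find? (fun c => keyOf c == M) = some (scanChoice l M) := by
  intro l
  induction l with
  | nil =>
    intro M _ hreal
    obtain ⟨c0, hc0, hk⟩ := hreal
    rw [List.sublist_nil] at hc0
    subst hc0
    have hM : M = [] := by rw [← hk]; rfl
    subst hM
    rfl
  | cons x xs ih =>
    intro M hM hreal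
    by_cases hMnil : M = []
    · subst hMnil
      rw [scanChoice_nil_key]
      rfl
    · obtain ⟨k, hk⟩ : ∃ k, M.length = k + 1 := by
        cases M with
        | nil => exact absurd rfl hMnil
        | cons _ _ => exact ⟨_, rfl⟩
      rw [hk]
      simp only [pyCombinations]
      rw [List.find?_append]
      obtain ⟨c0, hc0sub, hc0key⟩ := hreal
      by_cases hx : x ∈ M
      · have hreal' : ∃ c0', c0'.Sublist xs ∧ keyOf c0' = M.erase x := by
          rcases List.sublist_cons_iff.mp hc0sub with hsub | ⟨r, rfl, hr⟩
          · have hxc0 : x ∈ c0 := (keyOf_perm c0).subset (hc0key ▸ hx)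
            refine ⟨c0.erase x, List.Sublist.trans List.erase_sublist hsub, ?_⟩
            have hperm : (c0.erase x).Perm (M.erase x) := by
              have h' := List.Perm.erase x (keyOf_perm c0).symm
              rw [hc0key] at h'
              exact h'
            rw [keyOf_eq_of_perm _ _ hperm]
            exact keyOf_sorted_self _ (sorted_erase x M hM)
          · refine ⟨r, hr, ?_⟩
            have h' : insertDesc x (keyOf r) = M := by rw [← keyOf_cons, hc0key]
            rw [← h', erase_insertDesc x _ (keyOf_sorted r)]
        have hlen' : (M.erase x).length = k := by
          have := List.length_erase_of_mem hx
          omega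
        have hfirst : (List.map (fun c => x :: c) (pyCombinations xs k)).find?
            (fun c => keyOf c == M) = some (x :: scanChoice xs (M.erase x)) := by
          rw [List.find?_map]
          have hpred : ((fun c => keyOf c == M) ∘ (fun c => x :: c))
              = fun c => keyOf c == M.erase x := by
            funext c
            simp only [Function.comp_apply, keyOf_cons]
            by_cases h : keyOf c = M.erase x
            · rw [h, insertDesc_erase x M hM hx]
              simp
            · have h2 : insertDesc x (keyOf c) ≠ M := by
                intro he
                apply h
                rw [← he, erase_insertDesc x _ (keyOf_sorted c)]
              simp [h, h2]
          rw [hpred, ← hlen', ih (M.erase x) (sorted_erase x M hM) hreal']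
          rfl
        rw [hfirst]
        simp only [scanChoice, if_pos hx]
        rfl
      · have hfirst : (List.map (fun c => x :: c) (pyCombinations xs k)).find?
            (fun c => keyOf c == M) = none := by
          rw [List.find?_eq_none]
          intro cc hcc
          rw [List.mem_map] at hcc
          obtain ⟨c', _, rfl⟩ := hcc
          simp only [beq_iff_eq]
          intro hkey
          apply hx
          rw [← hkey, keyOf_cons]
          exact mem_insertDesc_self x (keyOf c')
        rw [hfirst, Option.none_or]
        have hreal' : ∃ c0', c0'.Sublist xs ∧ keyOf c0' = M := by
          rcases List.sublist_cons_iff.mp hc0sub with hsub | ⟨r, rfl, hr⟩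
          · exact ⟨c0, hsub, hc0key⟩
          · exfalso
            apply hx
            rw [← hc0key, keyOf_cons]
            exact mem_insertDesc_self x (keyOf r)
        have h' := ih M hM hreal'
        rw [hk] at h'
        rw [h']
        simp only [scanChoice, if_neg hx]

theorem find?_combsA (tiles : List Int) (M : List Int) (hM : DescSorted M) (hne : M ≠ [])
    (hreal : ∃ c0, c0.Sublist tiles ∧ keyOf c0 = M) :
    (combsA tiles M.sum).find? (fun c => keyOf c == M) = some (scanChoice tiles M) := by
  obtain ⟨c0, hc0sub, hc0key⟩ := hreal
  have hlen : M.length = c0.length := by rw [← hc0key, length_keyOf]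
  have hL1 : 1 ≤ M.length := by
    cases M with
    | nil => exact absurd rfl hne
    | cons _ _ => simp
  have hLn : M.length ≤ tiles.length := by
    rw [hlen]; exact hc0sub.length_le
  have hsplit : PySem.List.pyRange (tiles.length : Int) 0 (-1)
      = PySem.List.pyRange (tiles.length : Int) (M.length : Int) (-1)
        ++ (M.length : Int) :: PySem.List.pyRange ((M.length : Int) - 1) 0 (-1) := by
    have h1 := PySem.List.pyRange_neg_one_eq_reverse (tiles.length : Int) 0
    have h2 := PySem.List.pyRange_one_append 1 ((M.length : Int) + 1) ((tiles.length : Int) + 1)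
      (by omega) (by omega)
    have h3 := PySem.List.pyRange_neg_one_eq_reverse (tiles.length : Int) (M.length : Int)
    have h4 := PySem.List.pyRange_neg_one_eq_reverse (M.length : Int) 0
    have h5 := PySem.List.pyRange_neg_one_cons
      (show (0 : Int) < (M.length : Int) by exact_mod_cast hL1)
    rw [show ((0 : Int) + 1) = 1 by norm_num] at h1 h4
    rw [h1, h2, List.reverse_append, ← h3, ← h4, h5]
  unfold combsA
  rw [hsplit, List.flatMap_append, List.flatMap_cons, List.find?_append, List.find?_append]
  have hbig : (List.flatMap (fun i => (pyCombinations tiles i.toNat).filter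
      (fun seq => seq.sum == M.sum))
      (PySem.List.pyRange (tiles.length : Int) (M.length : Int) (-1))).find?
      (fun c => keyOf c == M) = none := by
    rw [List.find?_eq_none]
    intro cc hcc
    rw [List.mem_flatMap] at hcc
    obtain ⟨i, hi, hci⟩ := hcc
    rw [PySem.List.mem_pyRange_neg_one] at hi
    rw [List.mem_filter] at hci
    obtain ⟨_, hlencc⟩ := (mem_pyCombinations tiles _ cc).mp hci.1
    simp only [beq_iff_eq]
    intro hkey
    have hlM : cc.length = M.length := by rw [← hkey, length_keyOf]
    omega
  rw [hbig, Option.none_or]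
  have hmid : ((pyCombinations tiles ((M.length : Int)).toNat).filter
      (fun seq => seq.sum == M.sum)).find? (fun c => keyOf c == M)
      = some (scanChoice tiles M) := by
    rw [Int.toNat_natCast]
    rw [find?_filter_imp _ _ ?himp]
    · exact find?_pyCombinations tiles M hM ⟨c0, hc0sub, hc0key⟩
    case himp =>
      intro c hp
      rw [beq_iff_eq] at hp
      rw [beq_iff_eq, ← hp, sum_keyOf]
  rw [hmid]
  rfl

-- ===== A-side: the fold picks the first combination whose key is maximal =====

theorem foldl_pick_const (L : List (List Int)) : ∀ acc : List Int,
    (∀ c ∈ L, gtKey (keyOf c) (keyOf acc) = false) →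
    L.foldl (fun cc comb => if greater_than comb cc then comb else cc) acc = acc := by
  induction L with
  | nil => intro acc _; rfl
  | cons c L ih =>
    intro acc h
    rw [List.foldl_cons, greater_than_eq, h c (List.mem_cons_self ..),
      if_neg Bool.false_ne_true]
    exact ih acc (fun d hd => h d (List.mem_cons_of_mem _ hd))

theorem foldl_pick_first (M : List Int) : ∀ (L1 : List (List Int)) (e : List Int)
    (L2 : List (List Int)) (acc : List Int),
    (∀ c ∈ L1, gtKey M (keyOf c) = true) → gtKey M (keyOf acc) = true → keyOf e = M →
    (∀ c ∈ L2, gtKey (keyOf c) M = false) →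
    (L1 ++ e :: L2).foldl (fun cc comb => if greater_than comb cc then comb else cc) acc = e := by
  intro L1
  induction L1 with
  | nil =>
    intro e L2 acc _ hacc he hL2
    rw [List.nil_append, List.foldl_cons, greater_than_eq, he, if_pos hacc]
    apply foldl_pick_const
    intro c hc
    rw [he]
    exact hL2 c hc
  | cons c1 L1 ih =>
    intro e L2 acc hL1 hacc he hL2
    rw [List.cons_append, List.foldl_cons]
    have hnew : gtKey M (keyOf (if greater_than c1 acc = true then c1 else acc)) = true := by
      split
      · exact hL1 c1 (List.mem_cons_self ..)
      · exact hacc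
    exact ih e L2 _ (fun c hc => hL1 c (List.mem_cons_of_mem _ hc)) hnew he hL2

-- ===== A-side: flip_tiles of the scan choice =====

theorem scanChoice_sublist : ∀ (l M : List Int), (scanChoice l M).Sublist l := by
  intro l
  induction l with
  | nil => intro M; exact List.Sublist.refl _
  | cons x xs ih =>
    intro M
    simp only [scanChoice]
    split
    · exact List.Sublist.cons₂ x (ih _)
    · exact (ih M).cons x

theorem mem_scanChoice : ∀ (l M : List Int) (d : Int), d ∈ scanChoice l M → d ∈ M := by
  intro l
  induction l with
  | nil => intro M d h; cases h
  | cons x xs ih =>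
    intro M d h
    simp only [scanChoice] at h
    split at h
    · rcases List.mem_cons.mp h with rfl | h'
      · assumption
      · exact List.mem_of_mem_erase (ih _ _ h')
    · exact ih _ _ h

theorem flip_cons : ∀ (r xs : List Int) (x : Int), r.Subperm xs → (∀ d ∈ r, d ≠ x) →
    List.foldl (fun acc digit => (PySem.List.remove? acc digit).getD []) (x :: xs) r =
      x :: List.foldl (fun acc digit => (PySem.List.remove? acc digit).getD []) xs r := by
  intro r
  induction r with
  | nil => intro xs x _ _; rfl
  | cons d r' ih =>
    intro xs x hsub hne
    have hdx : x ≠ d := fun h => hne d (List.mem_cons_self ..) h.symm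
    have hd_mem : d ∈ xs := hsub.subset (List.mem_cons_self ..)
    simp only [List.foldl_cons]
    have hmem' : d ∈ x :: xs := List.mem_cons_of_mem x hd_mem
    rw [PySem.List.remove?_eq_some_erase _ d hmem', PySem.List.remove?_eq_some_erase xs d hd_mem]
    simp only [Option.getD_some]
    rw [List.erase_cons_tail (by simp [hdx])]
    have hsub' : r'.Subperm (xs.erase d) := by
      have h' := List.Subperm.erase d hsub
      rwa [List.erase_cons_head] at h'
    exact ih (xs.erase d) x hsub' (fun e he => hne e (List.mem_cons_of_mem _ he))

theorem flip_scan : ∀ (l M : List Int), flip_tiles l (scanChoice l M) = scanAfter l M := by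
  intro l
  induction l with
  | nil => intro M; rfl
  | cons x xs ih =>
    intro M
    by_cases hx : x ∈ M
    · simp only [scanChoice, scanAfter, if_pos hx]
      unfold flip_tiles
      simp only [List.foldl_cons, PySem.List.remove?_cons_self, Option.getD_some]
      exact ih (M.erase x)
    · simp only [scanChoice, scanAfter, if_neg hx]
      unfold flip_tiles
      rw [flip_cons _ _ _ (scanChoice_sublist xs M).subperm
        (fun d hd h => hx (by rw [← h]; exact mem_scanChoice xs M d hd))]
      exact congrArg (List.cons x) (ih M)

-- ===== assembly =====

theorem main_equal (tiles : List Int) (t : Int) :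
    choose_and_flip tiles t = choose_and_flip_alt tiles t := by
  have hspec := bestTriple_spec tiles t
  rw [choose_and_flip_eq]
  cases hb : bestTriple tiles t with
  | none =>
    have hnone := hspec.1 hb
    have hempty : combsA tiles t = [] := by
      rw [List.eq_nil_iff_forall_not_mem]
      intro c hc
      obtain ⟨hsub, _, hsum⟩ := (mem_combsA tiles t c).mp hc
      exact hnone c hsub hsum
    rw [if_pos hempty]
    simp [choose_and_flip_alt, hb]
  | some r =>
    obtain ⟨c, a, k⟩ := r
    obtain ⟨hsub, hsum, hk, hsc, hsa, hmax⟩ := hspec.2 c a k hb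
    by_cases hc : c = []
    · subst hc
      have hknil : k = [] := hk
      have hempty : combsA tiles t = [] := by
        rw [List.eq_nil_iff_forall_not_mem]
        intro d hd
        obtain ⟨hdsub, hdne, hdsum⟩ := (mem_combsA tiles t d).mp hd
        have hmx := hmax d hdsub hdsum
        rw [hknil, gtKey_nil_right _ (fun h => hdne ((keyOf_eq_nil_iff d).mp h))] at hmx
        cases hmx
      rw [if_pos hempty]
      simp [choose_and_flip_alt, hb]
    · have hkne : k ≠ [] := by
        intro h
        rw [hk] at h
        exact hc ((keyOf_eq_nil_iff c).mp h)
      have hkey_sorted : DescSorted k := hk ▸ keyOf_sorted c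
      have hreal : ∃ c0, c0.Sublist tiles ∧ keyOf c0 = k := ⟨c, hsub, hk.symm⟩
      have hts : t = k.sum := by rw [hk, sum_keyOf]; exact hsum.symm
      have hfind := find?_combsA tiles k hkey_sorted hkne hreal
      rw [← hts, ← hsc] at hfind
      obtain ⟨_, L1, L2, hdecomp, hL1⟩ := List.find?_eq_some_iff_append.mp hfind
      have hglobal : ∀ d ∈ combsA tiles t, gtKey (keyOf d) k = false := by
        intro d hd
        obtain ⟨h1, _, h3⟩ := (mem_combsA tiles t d).mp hd
        exact hmax d h1 h3
      have hnonempty : combsA tiles t ≠ [] := by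
        rw [hdecomp]; simp
      rw [if_neg hnonempty]
      have hfold : (combsA tiles t).foldl
          (fun cc comb => if greater_than comb cc then comb else cc) [] = c := by
        rw [hdecomp]
        apply foldl_pick_first k L1 c L2 []
        · intro e he
          have hge : gtKey (keyOf e) k = false :=
            hglobal e (by rw [hdecomp]; exact List.mem_append_left _ he)
          have hne' : keyOf e ≠ k := by
            have := hL1 e he
            simpa using this
          cases hcase : gtKey k (keyOf e) with
          | true => rfl
          | false => exact absurd (gtKey_trichotomy _ _ hge hcase) hne'
        · exact gtKey_nil_right k hkne
        · exact hk.symm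
        · intro e he
          exact hglobal e (by rw [hdecomp]; exact List.mem_append_right _ (List.mem_cons_of_mem _ he))
      rw [hfold]
      have hflip : flip_tiles tiles c = a := by
        rw [hsc, flip_scan]
        exact hsa.symm
      rw [hflip]
      simp [choose_and_flip_alt, hb, hc]

-- ===== VERDICT (by name: the statement is the Claim_ definition above) =====
theorem choose_and_flip_spec : Claim_equal_choose_and_flip := by
  intro tiles dice_result _
  unfold Spec_choose_and_flip
  exact main_equal tiles dice_result
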